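-- pv_equiv track=rewrite | github.com/websee-id/intel-inaproc | inaproc_ws_scraper.py | parse_kode_lines
-- ===== SOURCE A (Python) =====
-- def parse_kode_lines(lines: list[str]) -> list[str]:
--     kodes = []
--     seen = set()
--     for line in lines:
--         value = line.strip()
--         if not value or value.startswith("#"):
--             continue
--         value = value.split(",", 1)[0].strip()
--         if value and value not in seen:
--             seen.add(value)
--             kodes.append(value)
--     return kodes
-- ===== SOURCE B (Python) =====
-- def _candidate(line: str) -> str:
--     value = line.strip()
--     if not value or value.startswith("#"):
--         return ""
--     return value.split(",", 1)[0].strip()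
--
--
-- def parse_kode_lines(lines: list[str]) -> list[str]:
--     # Build the result back-to-front: walk the lines in reverse, prepend each
--     # candidate and drop its later duplicates from the result built so far.
--     result = []
--     for line in reversed(lines):
--         c = _candidate(line)
--         if c:
--             result = [c] + [x for x in result if x != c]
--     return result
-- ===== Notes on version B (the rewrite author's own statement) =====
-- stated objective: alternative
-- what changed: A scans forward maintaining an explicit seen set; B walks the lines backwards with no auxiliary set, prepending each candidate and filtering its later duplicates out of the partial result, so the dedup happens by list filtering instead of set membership.
import Mathlib
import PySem

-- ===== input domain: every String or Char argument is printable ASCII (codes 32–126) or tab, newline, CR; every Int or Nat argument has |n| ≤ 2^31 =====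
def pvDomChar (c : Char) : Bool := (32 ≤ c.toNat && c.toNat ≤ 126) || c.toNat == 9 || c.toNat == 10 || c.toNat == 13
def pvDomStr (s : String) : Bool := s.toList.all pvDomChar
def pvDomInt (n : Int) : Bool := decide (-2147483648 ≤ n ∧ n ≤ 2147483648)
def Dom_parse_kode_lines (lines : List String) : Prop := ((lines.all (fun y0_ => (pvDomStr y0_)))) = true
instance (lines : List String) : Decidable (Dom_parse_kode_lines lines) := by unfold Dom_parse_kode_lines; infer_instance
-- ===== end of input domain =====

-- B replaces A's forward loop with an explicit seen set by a backwards loop (over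
-- reversed(lines)) that prepends each candidate and drops its later duplicates from
-- the result built so far — no auxiliary set, a different traversal order.


-- ===== PORT A =====
-- The loop body of A, one line of the for-loop on state (kodes, seen).
-- value.split(",", 1)[0]: split with a nonempty separator always yields a nonempty
-- list, so the Python [0] (which would raise on []) is exactly headD "".
def pvStepA (st : List String × PySem.Set String) (line : String) : List String × PySem.Set String :=
  let value := PySem.Str.strip line
  if value = "" || PySem.Str.startswith value "#" then st
  else
    let value := PySem.Str.strip (((PySem.Str.splitMax? value "," 1).getD []).headD "")
    if value ≠ "" && !(PySem.Set.contains st.2 value) then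
      (st.1 ++ [value], PySem.Set.add st.2 value)
    else st

def parse_kode_lines (lines : List String) : List String :=
  (lines.foldl pvStepA ([], PySem.Set.empty)).1

-- ===== PORT B =====
-- _candidate of Source B
def pvCandidate (line : String) : String :=
  let value := PySem.Str.strip line
  if value = "" || PySem.Str.startswith value "#" then ""
  else PySem.Str.strip (((PySem.Str.splitMax? value "," 1).getD []).headD "")

-- the loop body of Source B's 'for line in reversed(lines)'
def pvStepB (result : List String) (line : String) : List String :=
  let c := pvCandidate line
  if c = "" then result else c :: result.filter (fun x => x ≠ c)

def parse_kode_lines_alt (lines : List String) : List String :=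
  lines.reverse.foldl pvStepB []

-- ===== PRECONDITION & SPEC =====
def Spec_parse_kode_lines (lines : List String) (out : List String) : Prop := out = parse_kode_lines_alt lines
instance (lines : List String) (out : List String) : Decidable (Spec_parse_kode_lines lines out) := by unfold Spec_parse_kode_lines; infer_instance

-- ===== CLAIM (what is proved, stated in full; the proofs are below) =====
def Claim_equal_parse_kode_lines : Prop := ∀ (lines : List String), Dom_parse_kode_lines lines → Spec_parse_kode_lines lines (parse_kode_lines lines)

-- ===== LEMMAS AND PROOFS =====

-- A's loop keeps seen = set(kodes); with that invariant the state collapses to a single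
-- list built by Set.add over the nonempty candidates.
theorem parse_kode_lines_loop (lines : List String) (s : List String) :
    lines.foldl pvStepA (s, s)
    = (((lines.map pvCandidate).filter (fun c => c ≠ "")).foldl PySem.Set.add s,
       ((lines.map pvCandidate).filter (fun c => c ≠ "")).foldl PySem.Set.add s) := by
  induction lines generalizing s with
  | nil => rfl
  | cons line rest ih =>
    simp only [List.foldl_cons, List.map_cons, List.filter_cons]
    by_cases hb : (PySem.Str.strip line = "" || PySem.Str.startswith (PySem.Str.strip line) "#") = true
    · have hc : pvCandidate line = "" := by simp only [pvCandidate]; rw [if_pos hb]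
      have hstep : pvStepA (s, s) line = (s, s) := by simp only [pvStepA]; rw [if_pos hb]
      rw [hstep, hc]
      simp only [ne_eq, not_true, decide_false, Bool.false_eq_true, if_false]
      exact ih s
    · set v := PySem.Str.strip (((PySem.Str.splitMax? (PySem.Str.strip line) "," 1).getD []).headD "") with hv
      have hc : pvCandidate line = v := by simp only [pvCandidate]; rw [if_neg hb]
      rw [hc]
      by_cases h2 : v = ""
      · have hstep : pvStepA (s, s) line = (s, s) := by
          simp only [pvStepA]; rw [if_neg hb]
          rw [if_neg (by rw [← hv]; simp [h2])]
        rw [hstep, h2]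
        simp only [ne_eq, not_true, decide_false, Bool.false_eq_true, if_false]
        exact ih s
      · have hstep : pvStepA (s, s) line = (PySem.Set.add s v, PySem.Set.add s v) := by
          simp only [pvStepA]; rw [if_neg hb]
          by_cases h3 : PySem.Set.contains s v = true
          · have hadd : PySem.Set.add s v = s := by simp only [PySem.Set.add, h3, if_pos]
            simp only [← hv, h3, Bool.not_true, Bool.and_false, Bool.false_eq_true, if_false, hadd]
          · have hcf : PySem.Set.contains s v = false := by simpa using h3
            have hadd : PySem.Set.add s v = s ++ [v] := by simp only [PySem.Set.add, hcf, Bool.false_eq_true, if_false]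
            simp only [← hv, hcf, Bool.not_false, Bool.and_true, hadd]
            rw [if_pos (by simp [h2])]
        rw [hstep]
        simp only [ne_eq, h2, not_false_iff, decide_true, if_true, List.foldl_cons]
        exact ih (PySem.Set.add s v)

-- first-occurrence dedup stated as B computes it: cons the head, remove its copies from
-- the (deduped) tail
def pvDedupBack (cs : List String) : List String :=
  cs.foldr (fun c r => c :: r.filter (fun x => x ≠ c)) []

theorem pvDedupBack_cons (x : String) (t : List String) :
    pvDedupBack (x :: t) = x :: (pvDedupBack t).filter (fun y => y ≠ x) := rfl

-- the generalized bridge: building a set left-to-right from acc appends exactly the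
-- back-to-front dedup of xs minus what acc already holds
theorem foldl_add_eq_dedupBack (xs : List String) (acc : List String) :
    xs.foldl PySem.Set.add acc
    = acc ++ (pvDedupBack xs).filter (fun y => !(PySem.Set.contains acc y)) := by
  induction xs generalizing acc with
  | nil => simp [pvDedupBack]
  | cons x t ih =>
    rw [List.foldl_cons, pvDedupBack_cons, List.filter_cons]
    by_cases h : PySem.Set.contains acc x = true
    · have hmem : x ∈ acc := by simpa [PySem.Set.contains] using h
      have hadd : PySem.Set.add acc x = acc := by simp only [PySem.Set.add, h, if_true]
      rw [hadd, ih acc, if_neg (by simp [hmem])]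
      congr 1
      rw [List.filter_filter]
      refine (List.filter_congr ?_).symm
      intro y _
      by_cases hy : y = x
      · subst hy; simp [hmem]
      · simp [hy]
    · have hnm : x ∉ acc := by simpa [PySem.Set.contains] using h
      have hcf : PySem.Set.contains acc x = false := by simpa using h
      have hadd : PySem.Set.add acc x = acc ++ [x] := by simp only [PySem.Set.add, hcf, Bool.false_eq_true, if_false]
      rw [hadd, ih (acc ++ [x]), if_pos (by simp [PySem.Set.contains, hnm])]
      rw [List.append_assoc, List.singleton_append]
      congr 2
      rw [List.filter_filter]
      refine List.filter_congr ?_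
      intro y _
      by_cases hy : y = x
      · subst hy; simp [PySem.Set.contains]
      · simp [PySem.Set.contains, hy]

-- B's reversed loop is exactly pvDedupBack of the candidate list
theorem alt_eq_dedupBack (lines : List String) :
    parse_kode_lines_alt lines = pvDedupBack ((lines.map pvCandidate).filter (fun c => c ≠ "")) := by
  unfold parse_kode_lines_alt
  rw [List.foldl_reverse]
  induction lines with
  | nil => rfl
  | cons line rest ih =>
    rw [List.foldr_cons, List.map_cons, List.filter_cons, ih]
    by_cases h : pvCandidate line = ""
    · rw [if_neg (by simp [h])]
      show pvStepB _ line = _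
      simp only [pvStepB, h, if_true]
    · rw [if_pos (by simp [h]), pvDedupBack_cons]
      show pvStepB _ line = _
      simp only [pvStepB, h, if_false]

-- ===== VERDICT (by name: the statement is the Claim_ definition above) =====
theorem parse_kode_lines_spec : Claim_equal_parse_kode_lines := by
  intro lines _
  unfold Spec_parse_kode_lines parse_kode_lines
  rw [show (([], PySem.Set.empty) : List String × PySem.Set String) = (([] : List String), ([] : List String)) from rfl]
  rw [parse_kode_lines_loop, alt_eq_dedupBack]
  simpa using foldl_add_eq_dedupBack ((lines.map pvCandidate).filter (fun c => c ≠ "")) []
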